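-- pv_equiv track=rewrite | github.com/marhcouto/feup-cpd-proj | assign1/src/main.py | OnMult
-- ===== SOURCE A (Python) =====
-- def OnMult(n):
--
--     m1 = list()
--     m2 = list()
--     res = list()
--
--     for i in range(0, n):
--         m1.append([1] * n)
--         m2.append([i + 1] * n)
--         res.append([0] * n)
--
--     for i in range(0, n):
--         for j in range(0, n):
--             for k in range(0, n):
--                 res[i][j] += m1[i][k] * m2[k][j]
--
--     return res
-- ===== SOURCE B (Python) =====
-- def OnMult(n):
--     # each entry of the product is the same closed-form value
--     v = n * (n + 1) // 2
--     return [[v] * n for _ in range(n)]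
-- ===== Notes on version B (the rewrite author's own statement) =====
-- stated objective: faster
-- what changed: B replaces the O(n^3) triple-loop multiplication of the constant matrices (all-ones times the matrix whose k-th row is k+1) by the closed form n(n+1)/2 filled into an n x n matrix directly.
import Mathlib
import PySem

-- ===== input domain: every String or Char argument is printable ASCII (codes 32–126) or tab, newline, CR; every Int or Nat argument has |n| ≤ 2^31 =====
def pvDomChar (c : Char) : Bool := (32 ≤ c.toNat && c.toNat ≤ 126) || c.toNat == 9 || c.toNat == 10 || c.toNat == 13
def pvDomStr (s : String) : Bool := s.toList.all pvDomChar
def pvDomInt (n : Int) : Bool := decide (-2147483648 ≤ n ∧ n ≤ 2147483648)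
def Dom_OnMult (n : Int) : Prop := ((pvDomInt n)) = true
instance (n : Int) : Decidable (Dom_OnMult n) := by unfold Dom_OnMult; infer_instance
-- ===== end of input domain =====

-- Header: B fills the n×n matrix directly with the closed-form entry n(n+1)/2 instead of
-- running the O(n^3) triple loop; proved to return A's exact value for every n.


-- ===== PORT A =====
-- res[i][j] read / write; indices are always 0 ≤ i,j < n at every call site, where
-- pyGetD/pySetD are exact for Python's xs[i] / xs[i] = v.
def pvGet2 (res : List (List Int)) (i j : Int) : Int :=
  PySem.List.pyGetD (PySem.List.pyGetD res i []) j 0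

def pvSet2 (res : List (List Int)) (i j : Int) (v : Int) : List (List Int) :=
  PySem.List.pySetD res i (PySem.List.pySetD (PySem.List.pyGetD res i []) j v)

def OnMult (n : Int) : List (List Int) :=
  -- first loop: three appends per iteration
  let st := (PySem.List.pyRange 0 n 1).foldl
    (fun (st : List (List Int) × List (List Int) × List (List Int)) i =>
      (st.1 ++ [PySem.List.pyRepeat [(1 : Int)] n],
       st.2.1 ++ [PySem.List.pyRepeat [i + 1] n],
       st.2.2 ++ [PySem.List.pyRepeat [(0 : Int)] n]))
    ([], [], [])
  let m1 := st.1
  let m2 := st.2.1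
  let res0 := st.2.2
  -- triple loop: res[i][j] += m1[i][k] * m2[k][j]
  (PySem.List.pyRange 0 n 1).foldl (fun res i =>
    (PySem.List.pyRange 0 n 1).foldl (fun res j =>
      (PySem.List.pyRange 0 n 1).foldl (fun res k =>
        pvSet2 res i j (pvGet2 res i j + pvGet2 m1 i k * pvGet2 m2 k j)) res) res) res0

-- ===== PORT B =====
def OnMult_alt (n : Int) : List (List Int) :=
  let v := PySem.Int.floordiv (n * (n + 1)) 2
  (PySem.List.pyRange 0 n 1).map (fun _ => PySem.List.pyRepeat [v] n)

-- ===== PRECONDITION & SPEC =====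
def Spec_OnMult (n : Int) (out : List (List Int)) : Prop := out = OnMult_alt n
instance (n : Int) (out : List (List Int)) : Decidable (Spec_OnMult n out) := by unfold Spec_OnMult; infer_instance

-- ===== CLAIM (what is proved, stated in full; the proofs are below) =====
def Claim_equal_OnMult : Prop := ∀ (n : Int), Dom_OnMult n → Spec_OnMult n (OnMult n)

-- ===== LEMMAS AND PROOFS =====

-- Nat-index forms of the two access helpers
def pvG (res : List (List Int)) (a b : Nat) : Int := (res.getD a []).getD b 0
def pvS (res : List (List Int)) (a b : Nat) (v : Int) : List (List Int) :=
  res.set a ((res.getD a []).set b v)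

lemma pvGet2_cast (res : List (List Int)) (a b : Nat) :
    pvGet2 res (a : Int) (b : Int) = pvG res a b := by
  simp [pvGet2, pvG]

lemma pvSet2_cast (res : List (List Int)) (a b : Nat) (v : Int) :
    pvSet2 res (a : Int) (b : Int) v = pvS res a b v := by
  simp [pvSet2, pvS]

lemma pvS_length (res : List (List Int)) (a b : Nat) (v : Int) :
    (pvS res a b v).length = res.length := by simp [pvS]

lemma pvS_row (res : List (List Int)) (a b : Nat) (v : Int) (ha : a < res.length) :
    (pvS res a b v).getD a [] = (res.getD a []).set b v := by
  simp [pvS, List.getD, List.getElem?_set_self (by simpa using ha)]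

lemma pvG_pvS (res : List (List Int)) (a b : Nat) (v : Int)
    (ha : a < res.length) (hb : b < (res.getD a []).length) :
    pvG (pvS res a b v) a b = v := by
  rw [pvG, pvS_row _ _ _ _ ha]
  rw [List.getD_eq_getElem _ _ (by simpa [List.getD] using hb)]
  exact List.getElem_set_self (by simpa [List.getD] using hb)

lemma pvS_pvS (res : List (List Int)) (a b : Nat) (v w : Int) (ha : a < res.length) :
    pvS (pvS res a b v) a b w = pvS res a b w := by
  rw [pvS, pvS_row _ _ _ _ ha, pvS, List.set_set, List.set_set]
  rfl

lemma pvS_self (res : List (List Int)) (a b : Nat)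
    (ha : a < res.length) (hb : b < (res.getD a []).length) :
    pvS res a b (pvG res a b) = res := by
  rw [pvS, pvG, List.getD_eq_getElem (res.getD a []) 0 (by simpa [List.getD] using hb),
    List.set_getElem_self, List.getD_eq_getElem res [] (by simpa [List.getD] using ha),
    List.set_getElem_self]

-- inner k-loop: repeated '+= c' accumulates the sum
lemma pv_inner (l : List Int) (res : List (List Int)) (a b : Nat)
    (ha : a < res.length) (hb : b < (res.getD a []).length) :
    l.foldl (fun r c => pvS r a b (pvG r a b + c)) res
      = pvS res a b (pvG res a b + l.sum) := by
  induction l generalizing res with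
  | nil => simp [pvS_self res a b ha hb]
  | cons c t ih =>
    have ha' : a < (pvS res a b (pvG res a b + c)).length := by simpa [pvS_length] using ha
    have hb' : b < ((pvS res a b (pvG res a b + c)).getD a []).length := by
      rw [pvS_row _ _ _ _ ha]; simpa using hb
    simp only [List.foldl_cons]
    rw [ih _ ha' hb', pvG_pvS _ _ _ _ ha hb, pvS_pvS _ _ _ _ _ ha]
    simp [add_assoc]

lemma getD_append_len {α : Type} {d : α} (xs : List α) (y : α) (zs : List α) :
    (xs ++ y :: zs).getD xs.length d = y := by
  induction xs with
  | nil => rfl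
  | cons x t ih => simpa using ih

lemma set_append_len {α : Type} (xs : List α) (y v : α) (zs : List α) :
    (xs ++ y :: zs).set xs.length v = xs ++ v :: zs := by
  induction xs with
  | nil => rfl
  | cons x t ih => simp [ih]
lemma getD_set_self (res : List (List Int)) (a : Nat) (X : List Int) (ha : a < res.length) :
    (res.set a X).getD a [] = X := by
  simp [List.getD, List.getElem?_set_self (by simpa using ha)]

-- inner loop over range with a value function
lemma pv_inner' (K : Nat) (g : Nat → Int) (res : List (List Int)) (a b : Nat)
    (ha : a < res.length) (hb : b < (res.getD a []).length) :
    (List.range K).foldl (fun r c => pvS r a b (pvG r a b + g c)) res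
      = pvS res a b (pvG res a b + ((List.range K).map g).sum) := by
  have h := pv_inner ((List.range K).map g) res a b ha hb
  rwa [List.foldl_map] at h

lemma pv_jloop (M K : Nat) (a : Nat) (T : Int) (g : Nat → Nat → Int)
    (res : List (List Int)) (ha : a < res.length) (hM : M ≤ (res.getD a []).length)
    (hg : ∀ b, b < M → ((List.range K).map (g b)).sum = T) :
    (List.range M).foldl
        (fun r b => (List.range K).foldl (fun r c => pvS r a b (pvG r a b + g b c)) r) res
      = res.set a (((res.getD a []).take M).map (· + T) ++ (res.getD a []).drop M) := by
  induction M with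
  | zero =>
    simp only [List.range_zero, List.foldl_nil, List.take_zero, List.map_nil, List.drop_zero,
      List.nil_append]
    rw [List.getD_eq_getElem res [] (by simpa [List.getD] using ha), List.set_getElem_self]
  | succ M ih =>
    have hM' : M ≤ (res.getD a []).length := by omega
    have hMlt : M < (res.getD a []).length := by omega
    rw [List.range_succ, List.foldl_append, ih hM' (fun b hb => hg b (by omega)),
      List.foldl_cons, List.foldl_nil]
    set row := res.getD a [] with hrow
    have hPlen : ((row.take M).map (· + T)).length = M := by
      simp [List.length_take]; omega
    have hdrop : row.drop M = row[M] :: row.drop (M + 1) :=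
      (List.getElem_cons_drop (by simpa [List.getD] using hMlt)).symm
    have ha' : a < (res.set a ((row.take M).map (· + T) ++ row.drop M)).length := by
      simpa using ha
    have hrow' : (res.set a ((row.take M).map (· + T) ++ row.drop M)).getD a []
        = (row.take M).map (· + T) ++ row.drop M := getD_set_self _ _ _ ha
    have hb' : M < ((res.set a ((row.take M).map (· + T) ++ row.drop M)).getD a []).length := by
      rw [hrow']; simp [List.length_take]; omega
    rw [pv_inner' K (g M) _ a M ha' hb', pvS, hrow', hg M (by omega)]
    have hgetM : ((row.take M).map (· + T) ++ row.drop M).getD M 0 = row[M] := by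
      have h := getD_append_len (d := (0 : Int)) ((row.take M).map (· + T)) row[M] (row.drop (M + 1))
      rw [hPlen] at h
      rw [hdrop]; exact h
    have hsetM : ∀ v : Int, ((row.take M).map (· + T) ++ row.drop M).set M v
        = (row.take M).map (· + T) ++ v :: row.drop (M + 1) := by
      intro v
      have h := set_append_len ((row.take M).map (· + T)) row[M] v (row.drop (M + 1))
      rw [hPlen] at h
      rw [hdrop]; exact h
    rw [pvG, hrow', hgetM, hsetM, List.set_set]
    congr 1
    have h2 : (row.map (· + T)).take (M + 1) = (row.map (· + T)).take M ++ [row[M] + T] := by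
      rw [List.take_succ]
      simp [List.getElem?_eq_getElem (show M < (row.map (· + T)).length by simpa using hMlt)]
    rw [← List.map_take] at h2
    rw [h2]
    simp
lemma pv_iloop (N : Nat) (F : List (List Int) → Nat → List (List Int)) (r0 r1 : List Int)
    (hF : ∀ m res, m < N → res.length = N → res.getD m [] = r0 → F res m = res.set m r1) :
    (List.range N).foldl F (List.replicate N r0) = List.replicate N r1 := by
  suffices h : ∀ m, m ≤ N → (List.range m).foldl F (List.replicate N r0)
      = List.replicate m r1 ++ List.replicate (N - m) r0 by
    have hN := h N le_rfl
    simpa using hN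
  intro m hm
  induction m with
  | zero => simp
  | succ m ih =>
    rw [List.range_succ, List.foldl_append, ih (by omega), List.foldl_cons, List.foldl_nil]
    have hlen : (List.replicate m r1 ++ List.replicate (N - m) r0).length = N := by
      simp; omega
    have hsub : N - m = (N - (m + 1)) + 1 := by omega
    have hrow : (List.replicate m r1 ++ List.replicate (N - m) r0).getD m [] = r0 := by
      rw [hsub, List.replicate_succ]
      have h := getD_append_len (d := ([] : List Int)) (List.replicate m r1) r0
        (List.replicate (N - (m + 1)) r0)
      simpa using h
    rw [hF m _ (by omega) hlen hrow, hsub, List.replicate_succ]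
    have h := set_append_len (List.replicate m r1) r0 r1 (List.replicate (N - (m + 1)) r0)
    simp only [List.length_replicate] at h
    rw [h, List.replicate_succ']
    simp

lemma pv_gauss (N : Nat) :
    2 * ((List.range N).map (fun c : Nat => (c : Int) + 1)).sum = (N : Int) * ((N : Int) + 1) := by
  induction N with
  | zero => simp
  | succ N ih =>
    rw [List.range_succ, List.map_append, List.sum_append]
    simp only [List.map_cons, List.map_nil, List.sum_cons, List.sum_nil]
    push_cast
    nlinarith [ih]
lemma pv_main (n : Int) : OnMult n = OnMult_alt n := by
  by_cases hn : n ≤ 0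
  · unfold OnMult OnMult_alt
    rw [PySem.List.pyRange_one_eq_nil hn]
    rfl
  · push_neg at hn
    have hN : ((n.toNat : Int)) = n := Int.toNat_of_nonneg (by omega)
    set N := n.toNat with hNdef
    have hrange : PySem.List.pyRange 0 n 1 = (List.range N).map (fun k : Nat => (k : Int)) := by
      rw [PySem.List.pyRange_one]
      simp only [Int.sub_zero, zero_add]
      rfl
    set T : Int := ((List.range N).map (fun c : Nat => (c : Int) + 1)).sum with hT
    have hv : PySem.Int.floordiv (n * (n + 1)) 2 = T := by
      have hg := pv_gauss N
      rw [hN] at hg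
      rw [PySem.Int.floordiv_eq_ediv_of_pos (by norm_num), ← hg,
        Int.mul_ediv_cancel_left T (by norm_num)]
    simp only [OnMult, OnMult_alt, hrange, List.foldl_map, List.map_map]
    rw [PySem.List.foldl_prod_mk
      (f := fun (s : List (List Int)) (k : Nat) => s ++ [PySem.List.pyRepeat [(1 : Int)] n])
      (g := fun (s : List (List Int) × List (List Int)) (k : Nat) =>
        (s.1 ++ [PySem.List.pyRepeat [(k : Int) + 1] n],
         s.2 ++ [PySem.List.pyRepeat [(0 : Int)] n]))]
    rw [PySem.List.foldl_prod_mk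
      (f := fun (s : List (List Int)) (k : Nat) => s ++ [PySem.List.pyRepeat [(k : Int) + 1] n])
      (g := fun (s : List (List Int)) (k : Nat) => s ++ [PySem.List.pyRepeat [(0 : Int)] n])]
    simp only [PySem.List.foldl_append_singleton_eq_map, List.nil_append,
      PySem.List.pyRepeat_singleton, pvGet2_cast, pvSet2_cast, hv]
    simp only [Function.comp_def, ← hNdef, List.map_const', List.length_range]
    refine pv_iloop N _ (List.replicate N (0 : Int)) (List.replicate N T) ?_
    intro m res hm hlen hrowm
    have ha : m < res.length := by omega
    have hM : N ≤ (res.getD m []).length := by rw [hrowm]; simp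
    rw [pv_jloop N N m T _ res ha hM ?_]
    · rw [hrowm]
      simp [zero_add]
    · intro b hb
      rw [hT]
      refine congrArg List.sum (List.map_congr_left ?_)
      intro c hc
      have hclt : c < N := List.mem_range.mp hc
      have h1 : pvG (List.replicate N (List.replicate N (1 : Int))) m c = 1 := by
        simp [pvG, List.getD, hm, hclt]
      have h2 : pvG ((List.range N).map (fun x : Nat => List.replicate N ((x : Int) + 1))) c b
          = (c : Int) + 1 := by
        simp [pvG, List.getD, hclt, hb]
      rw [h1, h2, one_mul]

-- ===== VERDICT (by name: the statement is the Claim_ definition above) =====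
theorem OnMult_spec : Claim_equal_OnMult := by
  intro n _
  unfold Spec_OnMult
  exact pv_main n
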